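-- pv_equiv track=rewrite | github.com/LeamHall/admin_tools | find_copies.py | build_clean_set
-- ===== SOURCE A (Python) =====
-- def build_clean_set(full_set, exclude_list, match = 'full'):
--   '''
--   Given a set (or list), and a set/list of items to be excluded,
--     return a set of the original set/list minus the excluded items.
--   Optionally, match the exclusion on the entire string, or the
--     beginning. If there's a use for it, then endswith, too.
--   '''
--
--   exclude_set = set()
--   for exclude in exclude_list:
--     for item in full_set:
--       if ( ( match == 'starts' and item.startswith(exclude) ) or
--           ( match == 'full' and item == exclude ) ):
--         exclude_set.add(item)
--   return full_set - exclude_set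
-- ===== SOURCE B (Python) =====
-- def build_clean_set(full_set, exclude_list, match='full'):
--     # one pass: 'full' is a plain set difference; 'starts' filters once with a prefix tuple
--     if match == 'full':
--         return set(full_set) - set(exclude_list)
--     if match == 'starts':
--         prefixes = tuple(exclude_list)
--         return {item for item in full_set if not item.startswith(prefixes)}
--     return set(full_set)
-- ===== Notes on version B (the rewrite author's own statement) =====
-- stated objective: faster
-- what changed: Replaced the nested exclude-list x full-set loops that accumulate an exclusion set with a single pass: plain set difference for 'full' and one filter using startswith on a tuple of prefixes for 'starts'.
import Mathlib
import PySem

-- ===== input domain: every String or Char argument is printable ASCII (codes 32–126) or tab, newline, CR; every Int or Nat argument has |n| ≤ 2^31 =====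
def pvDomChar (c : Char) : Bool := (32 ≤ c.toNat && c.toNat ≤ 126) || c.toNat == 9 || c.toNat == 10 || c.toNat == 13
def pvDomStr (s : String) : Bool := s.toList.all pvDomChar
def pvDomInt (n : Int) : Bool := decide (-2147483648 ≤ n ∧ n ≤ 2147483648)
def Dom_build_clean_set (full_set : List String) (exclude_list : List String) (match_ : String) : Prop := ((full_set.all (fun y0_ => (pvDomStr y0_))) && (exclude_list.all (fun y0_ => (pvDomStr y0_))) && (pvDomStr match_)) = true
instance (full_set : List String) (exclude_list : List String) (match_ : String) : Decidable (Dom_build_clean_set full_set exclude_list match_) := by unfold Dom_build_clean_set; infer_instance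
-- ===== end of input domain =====

-- B replaces A's nested exclude×full loops by a single pass (set difference for 'full',
-- one prefix filter for 'starts'); equivalence is proved on all inputs.

-- ===== PORT A =====
-- literal transliteration: build exclude_set by the two nested loops, then full_set - exclude_set
def build_clean_set (full_set : List String) (exclude_list : List String) (match_ : String) : List String :=
  let exclude_set : PySem.Set String :=
    exclude_list.foldl (fun es exclude =>
      full_set.foldl (fun es item =>
        if (match_ == "starts" && PySem.Str.startswith item exclude) ||
           (match_ == "full" && item == exclude) then PySem.Set.add es item else es) es)
      PySem.Set.empty
  PySem.Set.diff full_set exclude_set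

-- ===== PORT B =====
-- 'full': set difference; 'starts': one filter with "startswith any prefix"; else: the set unchanged
-- (full_set arrives as a Python set, so Source B's set(full_set) is the identity and is ported as full_set)
def build_clean_set_alt (full_set : List String) (exclude_list : List String) (match_ : String) : List String :=
  if match_ == "full" then
    PySem.Set.diff full_set (PySem.Set.ofList exclude_list)
  else if match_ == "starts" then
    full_set.filter (fun item => !(exclude_list.any (fun p => PySem.Str.startswith item p)))
  else
    full_set

-- ===== PRECONDITION & SPEC =====
def Spec_build_clean_set (full_set : List String) (exclude_list : List String) (match_ : String) (out : List String) : Prop := out = build_clean_set_alt full_set exclude_list match_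
instance (full_set : List String) (exclude_list : List String) (match_ : String) (out : List String) : Decidable (Spec_build_clean_set full_set exclude_list match_ out) := by unfold Spec_build_clean_set; infer_instance

-- ===== CLAIM (what is proved, stated in full; the proofs are below) =====
def Claim_equal_build_clean_set : Prop := ∀ (full_set : List String) (exclude_list : List String) (match_ : String), Dom_build_clean_set full_set exclude_list match_ → Spec_build_clean_set full_set exclude_list match_ (build_clean_set full_set exclude_list match_)

-- ===== LEMMAS AND PROOFS =====

-- membership in the inner loop's accumulated set
lemma mem_inner (p : String → Bool) (l : List String) (es : PySem.Set String) (x : String) :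
    x ∈ l.foldl (fun es item => if p item then PySem.Set.add es item else es) es ↔
      x ∈ es ∨ (x ∈ l ∧ p x = true) := by
  induction l generalizing es with
  | nil => simp
  | cons a t ih =>
      by_cases h : p a = true <;>
        simp only [List.foldl_cons, h, Bool.false_eq_true, if_true, if_false, ih,
          PySem.Set.mem_add, List.mem_cons] <;>
      constructor
      · rintro ((hs | rfl) | ht)
        · exact Or.inl hs
        · exact Or.inr ⟨Or.inl rfl, h⟩
        · exact Or.inr ⟨Or.inr ht.1, ht.2⟩
      · rintro (hs | ⟨(rfl | ht), hp⟩)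
        · exact Or.inl (Or.inl hs)
        · exact Or.inl (Or.inr rfl)
        · exact Or.inr ⟨ht, hp⟩
      · rintro (hs | ht)
        · exact Or.inl hs
        · exact Or.inr ⟨Or.inr ht.1, ht.2⟩
      · rintro (hs | ⟨(rfl | ht), hp⟩)
        · exact Or.inl hs
        · exact absurd hp (by simp [h])
        · exact Or.inr ⟨ht, hp⟩

-- membership in the whole accumulated exclusion set
lemma mem_outer (q : String → String → Bool) (full excl : List String)
    (es : PySem.Set String) (x : String) :
    x ∈ excl.foldl (fun es e =>
        full.foldl (fun es item => if q item e then PySem.Set.add es item else es) es) es ↔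
      x ∈ es ∨ ∃ e ∈ excl, x ∈ full ∧ q x e = true := by
  induction excl generalizing es with
  | nil => simp
  | cons a t ih =>
      simp only [List.foldl_cons, ih, mem_inner]
      constructor
      · rintro ((hs | hf) | ⟨e, he, hx⟩)
        · exact Or.inl hs
        · exact Or.inr ⟨a, List.mem_cons_self .., hf⟩
        · exact Or.inr ⟨e, List.mem_cons_of_mem _ he, hx⟩
      · rintro (hs | ⟨e, he, hx⟩)
        · exact Or.inl (Or.inl hs)
        · rcases List.mem_cons.mp he with rfl | he
          · exact Or.inl (Or.inr hx)
          · exact Or.inr ⟨e, he, hx⟩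

theorem build_clean_set_spec_aux (full_set exclude_list : List String) (match_ : String) :
    build_clean_set full_set exclude_list match_ =
      build_clean_set_alt full_set exclude_list match_ := by
  unfold build_clean_set build_clean_set_alt
  simp only [PySem.Set.diff]
  by_cases hf : match_ = "full"
  · subst hf
    simp only [beq_iff_eq, reduceIte]
    refine List.filter_congr (fun x hx => ?_)
    congr 1
    rw [Bool.eq_iff_iff, PySem.Set.contains_iff, PySem.Set.contains_iff, mem_outer,
        PySem.Set.mem_ofList]
    simp [PySem.Set.empty, hx]
  · by_cases hs : match_ = "starts"
    · subst hs
      simp only [beq_iff_eq, reduceIte]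
      refine List.filter_congr (fun x hx => ?_)
      congr 1
      rw [Bool.eq_iff_iff, PySem.Set.contains_iff, mem_outer, List.any_eq_true]
      simp [PySem.Set.empty, hx]
    · simp only [beq_iff_eq, hf, hs, if_false]
      apply List.filter_eq_self.mpr
      intro x hx
      simp only [Bool.not_eq_true', Bool.eq_false_iff, ne_eq, PySem.Set.contains_iff]
      rw [mem_outer]
      simp [PySem.Set.empty, hf, hs]

-- ===== VERDICT (by name: the statement is the Claim_ definition above) =====
theorem build_clean_set_spec : Claim_equal_build_clean_set := by
  intro full_set exclude_list match_ _
  unfold Spec_build_clean_set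
  exact build_clean_set_spec_aux full_set exclude_list match_
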